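-- pv_equiv track=rewrite | github.com/sminju1009/Baekjoon | 프로그래머스/2/68645. 삼각 달팽이/삼각 달팽이.py | solution
-- ===== SOURCE A (Python) =====
-- def solution(n):
--     answer = []
--     arr = [[0] * i for i in range(1, n+1)]
--     end_num = n*(n+1)//2
--     dirs = [(1, 0), (0, 1), (-1, -1)]
--     turn = 0
--     y, x = 0, 0
--     i = 1
--
--     while i<=end_num:
--         arr[y][x] = i
--         i += 1
--         dy, dx = dirs[turn]
--         ny = y+dy
--         nx = x+dx
--         if 0<=ny<n and 0<=nx<n and arr[ny][nx] == 0: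
--             y, x = ny, nx
--         else:
--             turn = (turn+1)%3
--             dy, dx = dirs[turn]
--             y += dy
--             x += dx
--
--     for row in arr:
--         for item in row:
--             answer.append(item)
--     return answer
-- ===== SOURCE B (Python) =====
-- def solution(n):
--     arr = [[0] * i for i in range(1, n + 1)]
--     dirs = [(1, 0), (0, 1), (-1, -1)]
--     y, x = 0, 0
--     v = 1
--     for s in range(n):
--         dy, dx = dirs[s % 3]
--         for _ in range(n - s):
--             arr[y][x] = v
--             v += 1
--             y += dy
--             x += dx
--         y -= dy; x -= dx
--         dy, dx = dirs[(s + 1) % 3]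
--         y += dy; x += dx
--     return [item for row in arr for item in row]
-- ===== Notes on version B (the rewrite author's own statement) =====
-- stated objective: faster
-- what changed: Replaces the while-loop that probes the grid for boundary/nonzero collisions at every cell with a direct iteration over the n spiral segments (segment s has length n-s and direction dirs[s%3]), filling each segment with consecutive numbers and stepping to the next segment start arithmetically, so no grid reads or bounds checks are needed.
-- outside the precondition, e.g. on solution(-2): A raises IndexError, B returns []
import Mathlib
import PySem

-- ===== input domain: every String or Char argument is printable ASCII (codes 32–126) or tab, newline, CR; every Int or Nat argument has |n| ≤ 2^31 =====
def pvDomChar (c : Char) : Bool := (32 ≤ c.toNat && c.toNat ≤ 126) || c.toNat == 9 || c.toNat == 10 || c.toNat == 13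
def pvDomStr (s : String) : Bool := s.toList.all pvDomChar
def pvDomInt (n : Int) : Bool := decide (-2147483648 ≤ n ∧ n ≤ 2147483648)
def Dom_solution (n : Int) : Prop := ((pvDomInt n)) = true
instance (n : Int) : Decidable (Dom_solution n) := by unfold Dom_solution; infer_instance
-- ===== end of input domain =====

-- B replaces A's per-cell collision probing with direct segment-by-segment filling (segment s: length n-s,
-- direction dirs[s%3]); measurably faster by a constant factor (no grid reads/bounds checks per cell).

-- ===== PORT A =====

-- shared 2D jagged-list primitives: arr[y][x] read (none = IndexError) and arr[y][x] = v write.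
-- The write is exact where Python's write succeeds; on Pre_ inputs every write both programs perform is in range.
def pyGet2 (arr : List (List Int)) (y x : Int) : Option Int :=
  match PySem.List.pyGet? arr y with
  | some row => PySem.List.pyGet? row x
  | none => none

def pySet2 (arr : List (List Int)) (y x v : Int) : List (List Int) :=
  match PySem.List.pyGet? arr y with
  | some row => PySem.List.pySetD arr y (PySem.List.pySetD row x v)
  | none => arr

def pyDirs : List (Int × Int) := [(1, 0), (0, 1), (-1, -1)]

-- A's while loop, state (arr, turn, y, x, i).  In the guard, Python evaluates `arr[ny][nx] == 0` only after the
-- bounds checks; where that read would still raise IndexError the port's condition is False — on Pre_ inputs such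
-- a read never happens (every guarded read A performs there is in range).
def solutionLoop (n endNum : Int) (arr : List (List Int)) (turn y x i : Int) : List (List Int) :=
  if _h : i ≤ endNum then
    let arr' := pySet2 arr y x i
    let d := (PySem.List.pyGet? pyDirs turn).getD (0, 0)
    let ny := y + d.1
    let nx := x + d.2
    if 0 ≤ ny ∧ ny < n ∧ 0 ≤ nx ∧ nx < n ∧ pyGet2 arr' ny nx = some 0 then
      solutionLoop n endNum arr' turn ny nx (i + 1)
    else
      let turn' := PySem.Int.mod (turn + 1) 3
      let d' := (PySem.List.pyGet? pyDirs turn').getD (0, 0)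
      solutionLoop n endNum arr' turn' (y + d'.1) (x + d'.2) (i + 1)
  else arr
termination_by (endNum + 1 - i).toNat
decreasing_by all_goals omega

def solution (n : Int) : List Int :=
  let arr := (PySem.List.pyRange 1 (n + 1) 1).map (fun i => List.replicate i.toNat (0 : Int))
  let endNum := PySem.Int.floordiv (n * (n + 1)) 2
  let final := solutionLoop n endNum arr 0 0 0 1
  final.foldl (fun answer row => row.foldl (fun answer item => answer ++ [item]) answer) []

-- ===== PORT B =====

-- B's outer for-loop body over segment index s; state (arr, y, x, v)
def segStep (n : Int) (st : List (List Int) × Int × Int × Int) (s : Int) :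
    List (List Int) × Int × Int × Int :=
  let d := (PySem.List.pyGet? pyDirs (PySem.Int.mod s 3)).getD (0, 0)
  let st2 := (PySem.List.pyRange 0 (n - s) 1).foldl
      (fun (st2 : List (List Int) × Int × Int × Int) _ =>
        (pySet2 st2.1 st2.2.1 st2.2.2.1 st2.2.2.2, st2.2.1 + d.1, st2.2.2.1 + d.2, st2.2.2.2 + 1))
      st
  let y := st2.2.1 - d.1
  let x := st2.2.2.1 - d.2
  let d' := (PySem.List.pyGet? pyDirs (PySem.Int.mod (s + 1) 3)).getD (0, 0)
  (st2.1, y + d'.1, x + d'.2, st2.2.2.2)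

def solution_alt (n : Int) : List Int :=
  let arr := (PySem.List.pyRange 1 (n + 1) 1).map (fun i => List.replicate i.toNat (0 : Int))
  let st := (PySem.List.pyRange 0 n 1).foldl (segStep n) (arr, 0, 0, 1)
  st.1.flatMap (fun row => row)

-- ===== PRECONDITION & SPEC =====
-- Pre_ excludes exactly n ≤ -2, where A raises IndexError (end_num > 0 but the jagged array is empty).
def Pre_solution (n : Int) : Prop := -1 ≤ n
instance (n : Int) : Decidable (Pre_solution n) := by unfold Pre_solution; infer_instance

def pvWitness_solution : Int := (4)

def Spec_solution (n : Int) (out : List Int) : Prop := out = solution_alt n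
instance (n : Int) (out : List Int) : Decidable (Spec_solution n out) := by unfold Spec_solution; infer_instance

-- ===== CLAIM (what is proved, stated in full; the proofs are below) =====
def Claim_equal_solution : Prop := ∀ (n : Int), Dom_solution n → Pre_solution n → Spec_solution n (solution n)

-- ===== LEMMAS AND PROOFS =====

-- The canonical cell sequence: the j-th cell of spiral segment s (s = 3q+r; r = 0 down the left edge of round q,
-- r = 1 right along its bottom, r = 2 up its diagonal).
def posC (n s j : Int) : Int × Int :=
  if s % 3 = 0 then (2 * (s / 3) + j, s / 3)
  else if s % 3 = 1 then (n - 1 - s / 3, 1 + s / 3 + j)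
  else (n - 2 - s / 3 - j, n - 2 - 2 * (s / 3) - j)

def dvec (r : Int) : Int × Int := if r = 0 then (1, 0) else if r = 1 then (0, 1) else (-1, -1)

def inTri (n : Int) (c : Int × Int) : Prop := 0 ≤ c.2 ∧ c.2 ≤ c.1 ∧ c.1 < n

def segL (n s : Int) : List (Int × Int) := (List.range (n - s).toNat).map (fun (j : Nat) => posC n s (j : Int))

-- cells filled before placing the (j+1)-th number of segment s
def pref (n s j : Int) : List (Int × Int) :=
  ((List.range s.toNat).map (fun (s' : Nat) => segL n (s' : Int))).flatten
    ++ (List.range j.toNat).map (fun (j' : Nat) => posC n s (j' : Int))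

def grid0 (n : Int) : List (List Int) :=
  (List.range n.toNat).map (fun i => List.replicate (i + 1) (0 : Int))

def fillL : List (Int × Int) → Int → List (List Int) → List (List Int)
  | [], _, g => g
  | c :: cs, v, g => fillL cs (v + 1) (pySet2 g c.1 c.2 v)

-- ---- geometry ----

theorem posC_tri {n s j : Int} (hs0 : 0 ≤ s) (hsn : s < n) (hj0 : 0 ≤ j) (hj : j < n - s) :
    inTri n (posC n s j) := by
  unfold inTri posC; split_ifs <;> refine ⟨?_, ?_, ?_⟩ <;> simp <;> omega

theorem posC_inj {n s s' j j' : Int} (h0 : 0 ≤ s') (h1 : s' ≤ s) (h2 : s < n)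
    (h3 : 0 ≤ j') (h4 : j' < n - s') (h5 : 0 ≤ j) (h6 : j < n - s)
    (h : posC n s' j' = posC n s j) : s' = s ∧ j' = j := by
  unfold posC at h; split_ifs at h <;> rw [Prod.mk.injEq] at h <;> omega

theorem posC_step {n s j : Int} :
    posC n s (j + 1) = ((posC n s j).1 + (dvec (s % 3)).1, (posC n s j).2 + (dvec (s % 3)).2) := by
  unfold posC dvec; split_ifs <;> simp <;> try omega

theorem posC_turn {n s : Int} :
    posC n (s + 1) 0 = ((posC n s (n - s - 1)).1 + (dvec ((s + 1) % 3)).1,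
                        (posC n s (n - s - 1)).2 + (dvec ((s + 1) % 3)).2) := by
  unfold posC dvec; split_ifs <;> rw [Prod.mk.injEq] <;> constructor <;> simp <;> omega

theorem posC_wrap {n s : Int} (h2 : 2 ≤ s) (hn : s < n) :
    posC n s (n - s) = posC n (s - 2) 0 := by
  unfold posC; split_ifs <;> rw [Prod.mk.injEq] <;> constructor <;> omega

-- ---- jagged-grid primitives ----

theorem pyGet2_nonneg (g : List (List Int)) {y x : Int} (hy : 0 ≤ y) (hx : 0 ≤ x) :
    pyGet2 g y x = (g[y.toNat]?.bind fun row => row[x.toNat]?) := by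
  simp only [pyGet2, PySem.List.pyGet?_of_nonneg _ hy]
  cases h : g[y.toNat]? with
  | none => rfl
  | some row => simp [PySem.List.pyGet?_of_nonneg _ hx]

theorem pySet2_nonneg (g : List (List Int)) {y x : Int} (v : Int) (hy : 0 ≤ y) (hx : 0 ≤ x) :
    pySet2 g y x v = match g[y.toNat]? with
      | some row => g.set y.toNat (row.set x.toNat v)
      | none => g := by
  simp only [pySet2, PySem.List.pyGet?_of_nonneg _ hy]
  cases h : g[y.toNat]? with
  | none => rfl
  | some row =>
    simp [PySem.List.pySetD_of_nonneg _ _ hy, PySem.List.pySetD_of_nonneg _ _ hx]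

theorem pyGet2_set2_same {g : List (List Int)} {y x : Int} (v : Int) (hy : 0 ≤ y) (hx : 0 ≤ x)
    (h : (pyGet2 g y x).isSome) : pyGet2 (pySet2 g y x v) y x = some v := by
  rw [pyGet2_nonneg g hy hx] at h
  rw [pyGet2_nonneg _ hy hx, pySet2_nonneg g v hy hx]
  cases hrow : g[y.toNat]? with
  | none => rw [hrow] at h; simp at h
  | some row =>
    rw [hrow] at h
    have hylen : y.toNat < g.length := by
      by_contra hc
      rw [List.getElem?_eq_none_iff.mpr (by omega)] at hrow; simp at hrow
    have hxlen : x.toNat < row.length := by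
      by_contra hc
      simp only [Option.bind_some] at h
      rw [List.getElem?_eq_none_iff.mpr (by omega)] at h
      simp at h
    simp [List.getElem?_set_eq_of_lt _ hylen, List.getElem?_set_eq_of_lt _ hxlen]

theorem pyGet2_set2_ne {g : List (List Int)} {y x y' x' : Int} (v : Int) (hy : 0 ≤ y) (hx : 0 ≤ x)
    (hy' : 0 ≤ y') (hx' : 0 ≤ x') (hne : ¬ (y = y' ∧ x = x')) :
    pyGet2 (pySet2 g y x v) y' x' = pyGet2 g y' x' := by
  rw [pyGet2_nonneg _ hy' hx', pyGet2_nonneg _ hy' hx', pySet2_nonneg g v hy hx]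
  cases hrow : g[y.toNat]? with
  | none => rfl
  | some row =>
    by_cases hyy : y = y'
    · subst hyy
      have hx2 : x.toNat ≠ x'.toNat := by omega
      have hylen : y.toNat < g.length := by
        by_contra hc
        rw [List.getElem?_eq_none_iff.mpr (by omega)] at hrow; simp at hrow
      rw [List.getElem?_set_eq_of_lt _ hylen, hrow]
      simp [List.getElem?_set_ne hx2]
    · have hne2 : y.toNat ≠ y'.toNat := by omega
      rw [List.getElem?_set_ne hne2]

theorem shape_set2 {g : List (List Int)} {y x : Int} (v : Int) (hy : 0 ≤ y) (hx : 0 ≤ x) :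
    (pySet2 g y x v).map List.length = g.map List.length := by
  rw [pySet2_nonneg g v hy hx]
  cases hrow : g[y.toNat]? with
  | none => rfl
  | some row =>
    have hylen : y.toNat < g.length := by
      by_contra hc
      rw [List.getElem?_eq_none_iff.mpr (by omega)] at hrow; simp at hrow
    have hgy : g[y.toNat] = row := by
      rw [List.getElem?_eq_some_iff] at hrow; exact hrow.2
    apply List.ext_getElem
    · simp
    · intro k h1 h2
      simp only [List.getElem_map]
      by_cases hk : k = y.toNat
      · subst hk
        simp [hgy]
      · simp [List.getElem_set_ne (by omega : y.toNat ≠ k)]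

theorem pyGet2_isSome_shape {g g' : List (List Int)} {y x : Int} (hy : 0 ≤ y) (hx : 0 ≤ x)
    (h : g.map List.length = g'.map List.length) :
    (pyGet2 g y x).isSome = (pyGet2 g' y x).isSome := by
  rw [pyGet2_nonneg _ hy hx, pyGet2_nonneg _ hy hx]
  have hlen : g.length = g'.length := by
    have := congrArg List.length h; simpa using this
  by_cases hyl : y.toNat < g.length
  · have hrow : g[y.toNat]? = some (g[y.toNat]) := List.getElem?_eq_some_iff.mpr ⟨hyl, rfl⟩
    have hrow' : g'[y.toNat]? = some (g'[y.toNat]'(by omega)) :=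
      List.getElem?_eq_some_iff.mpr ⟨by omega, rfl⟩
    have hrl : (g[y.toNat]).length = (g'[y.toNat]'(by omega)).length := by
      have h1 : (g.map List.length)[y.toNat]? = (g'.map List.length)[y.toNat]? := by rw [h]
      rw [List.getElem?_map, List.getElem?_map, hrow, hrow'] at h1
      simpa using h1
    rw [hrow, hrow']
    simp only [Option.bind_some]
    by_cases hxl : x.toNat < g[y.toNat].length
    · rw [List.getElem?_eq_some_iff.mpr ⟨hxl, rfl⟩,
        List.getElem?_eq_some_iff.mpr ⟨(by omega : x.toNat < (g'[y.toNat]'(by omega)).length), rfl⟩]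
      rfl
    · rw [(List.getElem?_eq_none_iff (l := g[y.toNat])).mpr (by omega),
        (List.getElem?_eq_none_iff (l := g'[y.toNat]'(by omega))).mpr (by omega)]
  · rw [List.getElem?_eq_none_iff.mpr (by omega), List.getElem?_eq_none_iff.mpr (by omega)]

theorem pyGet2_grid0 {n y x : Int} (hy : 0 ≤ y) (hx : 0 ≤ x) :
    pyGet2 (grid0 n) y x = if y < n ∧ x ≤ y then some 0 else none := by
  rw [pyGet2_nonneg _ hy hx]
  by_cases hyl : y < n
  · have h1 : y.toNat < n.toNat := by omega
    have hrow : (grid0 n)[y.toNat]? = some (List.replicate (y.toNat + 1) (0 : Int)) := by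
      unfold grid0
      rw [List.getElem?_map, List.getElem?_eq_some_iff.mpr ⟨by simpa using h1, rfl⟩]
      simp
    rw [hrow]
    simp only [Option.bind_some, List.getElem?_replicate]
    by_cases hxl : x ≤ y
    · rw [if_pos (by omega), if_pos ⟨hyl, hxl⟩]
    · rw [if_neg (by omega), if_neg (by tauto)]
  · have hrow : (grid0 n)[y.toNat]? = none := by
      unfold grid0
      rw [List.getElem?_eq_none_iff.mpr (by simp; omega)]
    rw [hrow]
    simp [hyl]

-- ---- fill ----

theorem fillL_append (L M : List (Int × Int)) (v : Int) (g : List (List Int)) :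
    fillL (L ++ M) v g = fillL M (v + L.length) (fillL L v g) := by
  induction L generalizing v g with
  | nil => simp [fillL]
  | cons c cs ih =>
    simp only [List.cons_append, fillL, ih, List.length_cons]
    congr 1
    push_cast
    ring

theorem fillL_snoc (L : List (Int × Int)) (c : Int × Int) (v : Int) (g : List (List Int)) :
    fillL (L ++ [c]) v g = pySet2 (fillL L v g) c.1 c.2 (v + L.length) := by
  rw [fillL_append]
  rfl

theorem fillL_not_mem (L : List (Int × Int)) (v : Int) (g : List (List Int)) {y x : Int}
    (hy : 0 ≤ y) (hx : 0 ≤ x)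
    (h : ∀ c ∈ L, 0 ≤ c.1 ∧ 0 ≤ c.2 ∧ ¬ (c.1 = y ∧ c.2 = x)) :
    pyGet2 (fillL L v g) y x = pyGet2 g y x := by
  induction L generalizing v g with
  | nil => rfl
  | cons c cs ih =>
    have hc := h c (by simp)
    rw [fillL, ih _ _ (fun c' hc' => h c' (by simp [hc']))]
    exact pyGet2_set2_ne _ hc.1 hc.2.1 hy hx hc.2.2

theorem fillL_mem (L : List (Int × Int)) (v : Int) (g : List (List Int)) {c : Int × Int}
    (hc : c ∈ L) (hL : ∀ c' ∈ L, 0 ≤ c'.1 ∧ 0 ≤ c'.2)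
    (hg : (pyGet2 g c.1 c.2).isSome) (hv : 1 ≤ v) :
    ∃ w, pyGet2 (fillL L v g) c.1 c.2 = some w ∧ w ≠ 0 := by
  induction L generalizing v g with
  | nil => simp at hc
  | cons a cs ih =>
    have ha := hL a (by simp)
    have hcc : 0 ≤ c.1 ∧ 0 ≤ c.2 := hL c hc
    by_cases hmem : c ∈ cs
    · rw [fillL]
      apply ih (v + 1) (pySet2 g a.1 a.2 v) hmem
        (fun c' hc' => hL c' (List.mem_cons_of_mem _ hc'))
      · rw [pyGet2_isSome_shape hcc.1 hcc.2 (shape_set2 _ ha.1 ha.2)]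
        exact hg
      · omega
    · have hca : c = a := by
        rcases List.mem_cons.mp hc with h | h
        · exact h
        · exact absurd h hmem
      subst hca
      rw [fillL]
      rw [fillL_not_mem _ _ _ hcc.1 hcc.2 (fun c' hc' => by
        refine ⟨(hL c' (List.mem_cons_of_mem _ hc')).1, (hL c' (List.mem_cons_of_mem _ hc')).2, ?_⟩
        intro hh
        exact hmem (by
          have : c' = c := Prod.ext hh.1 hh.2
          rwa [this] at hc'))]
      refine ⟨v, pyGet2_set2_same v hcc.1 hcc.2 hg, by omega⟩

-- ---- pref structure ----

theorem mem_pref_iff {n s j : Int} {c : Int × Int} (hs : 0 ≤ s) (hj : 0 ≤ j) :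
    c ∈ pref n s j ↔
      (∃ s' j', 0 ≤ s' ∧ s' < s ∧ 0 ≤ j' ∧ j' < n - s' ∧ c = posC n s' j') ∨
      (∃ j', 0 ≤ j' ∧ j' < j ∧ c = posC n s j') := by
  constructor
  · intro h
    rcases List.mem_append.mp h with h | h
    · rcases List.mem_flatten.mp h with ⟨l, hl, hcl⟩
      rcases List.mem_map.mp hl with ⟨s', hs', rfl⟩
      unfold segL at hcl
      rcases List.mem_map.mp hcl with ⟨j', hj', rfl⟩
      rw [List.mem_range] at hs' hj'
      exact Or.inl ⟨(s' : Int), (j' : Int), by omega, by omega, by omega, by omega, rfl⟩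
    · rcases List.mem_map.mp h with ⟨j', hj', rfl⟩
      rw [List.mem_range] at hj'
      exact Or.inr ⟨(j' : Int), by omega, by omega, rfl⟩
  · rintro (⟨s', j', h1, h2, h3, h4, rfl⟩ | ⟨j', h1, h2, rfl⟩)
    · apply List.mem_append.mpr; left
      apply List.mem_flatten.mpr
      refine ⟨segL n s', List.mem_map.mpr ⟨s'.toNat, List.mem_range.mpr (by omega),
        by rw [Int.toNat_of_nonneg h1]⟩, ?_⟩
      unfold segL
      exact List.mem_map.mpr ⟨j'.toNat, List.mem_range.mpr (by omega),
        by rw [Int.toNat_of_nonneg h3]⟩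
    · apply List.mem_append.mpr; right
      exact List.mem_map.mpr ⟨j'.toNat, List.mem_range.mpr (by omega),
        by rw [Int.toNat_of_nonneg h1]⟩

theorem pref_cells_tri {n s j : Int} (hs0 : 0 ≤ s) (hsn : s ≤ n) (hj0 : 0 ≤ j) (hjn : j ≤ n - s) :
    ∀ c ∈ pref n s j, inTri n c := by
  intro c hc
  rw [mem_pref_iff hs0 hj0] at hc
  rcases hc with ⟨s', j', h1, h2, h3, h4, rfl⟩ | ⟨j', h1, h2, rfl⟩
  · exact posC_tri h1 (by omega) h3 h4
  · exact posC_tri hs0 (by omega) h1 (by omega)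

theorem pref_snoc {n s j : Int} (hj : 0 ≤ j) :
    pref n s (j + 1) = pref n s j ++ [posC n s j] := by
  unfold pref
  rw [show (j + 1).toNat = j.toNat + 1 by omega, List.range_succ]
  simp [Int.toNat_of_nonneg hj]

theorem pref_seg {n s : Int} (hs : 0 ≤ s) :
    pref n (s + 1) 0 = pref n s (n - s) := by
  unfold pref
  rw [show (s + 1).toNat = s.toNat + 1 by omega, List.range_succ]
  simp only [List.map_append, List.map_cons, List.map_nil, List.flatten_append,
    List.flatten_cons, List.flatten_nil, List.append_nil, Int.toNat_of_nonneg hs,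
    Int.toNat_zero, List.range_zero]
  unfold segL
  simp

theorem len_pref_j {n s j : Int} : (pref n s j).length = (pref n s 0).length + j.toNat := by
  unfold pref
  simp

theorem len_pref0 (n : Int) : ∀ (k : Nat), (k : Int) ≤ n →
    2 * (((pref n (k : Int) 0).length : Int)) = k * (2 * n - k + 1) := by
  intro k
  induction k with
  | zero => intro _; simp [pref]
  | succ k ih =>
    intro hk
    have h1 : ((k : Int)) ≤ n := by push_cast at hk ⊢; omega
    have h2 := ih h1
    have h3 : pref n ((k : Int) + 1) 0 = pref n (k : Int) (n - k) := pref_seg (by positivity)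
    have h4 : (pref n (k : Int) (n - k)).length = (pref n (k : Int) 0).length + (n - k).toNat :=
      len_pref_j
    push_cast
    rw [h3, h4]
    push_cast at hk h2 ⊢
    have : ((n - (k : Int)).toNat : Int) = n - k := by omega
    rw [this] at *
    nlinarith [h2]

theorem len_lt {n s j : Int} (hs0 : 0 ≤ s) (hsn : s < n) (hj0 : 0 ≤ j) (hjn : j < n - s) :
    (pref n s j).length < (pref n n 0).length := by
  have h1 := len_pref0 n s.toNat (by omega)
  have h2 := len_pref0 n n.toNat (by omega)
  have h4 : ((s.toNat : Nat) : Int) = s := Int.toNat_of_nonneg hs0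
  have h5 : ((n.toNat : Nat) : Int) = n := Int.toNat_of_nonneg (by omega)
  rw [h4] at h1
  rw [h5] at h2
  have h3 : (pref n s j).length = (pref n s 0).length + j.toNat := len_pref_j
  have key : s * (2 * n - s + 1) + 2 * j < n * (2 * n - n + 1) := by
    nlinarith [sq_nonneg (n - s - 1)]
  omega

-- ---- direction lookup ----

theorem dirs_getD {r : Int} (h0 : 0 ≤ r) (h3 : r < 3) :
    (PySem.List.pyGet? pyDirs r).getD (0, 0) = dvec r := by
  have : r = 0 ∨ r = 1 ∨ r = 2 := by omega
  rcases this with rfl | rfl | rfl <;> decide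

-- lookups in the partially filled grid
theorem filled_zero {n s j : Int} {f : Int × Int} (hs0 : 0 ≤ s) (hsn : s ≤ n) (hj0 : 0 ≤ j)
    (hjn : j ≤ n - s) (hf : inTri n f) (hnm : f ∉ pref n s j) :
    pyGet2 (fillL (pref n s j) 1 (grid0 n)) f.1 f.2 = some 0 := by
  obtain ⟨hx0, hxy, hyn⟩ := hf
  rw [fillL_not_mem _ _ _ (by omega) hx0 (fun c hc => by
    obtain ⟨ht1, ht2, ht3⟩ := pref_cells_tri hs0 hsn hj0 hjn c hc
    refine ⟨by omega, ht1, ?_⟩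
    intro hh
    exact hnm (by rwa [show f = c from (Prod.ext hh.1 hh.2).symm]))]
  rw [pyGet2_grid0 (by omega) hx0]
  simp [hyn, hxy]

theorem filled_nonzero {n s j : Int} {f : Int × Int} (hs0 : 0 ≤ s) (hsn : s ≤ n) (hj0 : 0 ≤ j)
    (hjn : j ≤ n - s) (hm : f ∈ pref n s j) :
    pyGet2 (fillL (pref n s j) 1 (grid0 n)) f.1 f.2 ≠ some 0 := by
  have htri := pref_cells_tri hs0 hsn hj0 hjn
  obtain ⟨hf1, hf2, hf3⟩ := htri f hm
  obtain ⟨w, hw, hw0⟩ := fillL_mem (pref n s j) 1 (grid0 n) hm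
    (fun c hc => by obtain ⟨a1, a2, a3⟩ := htri c hc; exact ⟨by omega, a1⟩)
    (by rw [pyGet2_grid0 (by omega) hf1]
        simp [hf3, hf2])
    le_rfl
  rw [hw]
  simp [hw0]

-- ---- the A loop computes the canonical fill ----

theorem loopA_inv (n : Int) :
    ∀ (m : Nat), ∀ (s j : Int), 0 ≤ s → s < n → 0 ≤ j → j < n - s →
    (m : Int) = ((pref n n 0).length : Int) - ((pref n s j).length : Int) →
    solutionLoop n ((pref n n 0).length : Int)
        (fillL (pref n s j) 1 (grid0 n)) (s % 3) (posC n s j).1 (posC n s j).2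
        (((pref n s j).length : Int) + 1)
      = fillL (pref n n 0) 1 (grid0 n) := by
  intro m
  induction m using Nat.strong_induction_on with
  | h m IH =>
    intro s j hs0 hsn hj0 hjn hm
    have hlt : (pref n s j).length < (pref n n 0).length := len_lt hs0 hsn hj0 hjn
    rw [solutionLoop, dif_pos (by push_cast; omega)]
    -- the placed value extends the fill by one cell
    have harr : pySet2 (fillL (pref n s j) 1 (grid0 n)) (posC n s j).1 (posC n s j).2
        (((pref n s j).length : Int) + 1) = fillL (pref n s (j + 1)) 1 (grid0 n) := by
      rw [pref_snoc hj0, fillL_snoc]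
      congr 1
      omega
    have hdir : (PySem.List.pyGet? pyDirs (s % 3)).getD (0, 0) = dvec (s % 3) :=
      dirs_getD (by omega) (by omega)
    have hstep := posC_step (n := n) (s := s) (j := j)
    have hstep1 : (posC n s (j + 1)).1 = (posC n s j).1 + (dvec (s % 3)).1 := by rw [hstep]
    have hstep2 : (posC n s (j + 1)).2 = (posC n s j).2 + (dvec (s % 3)).2 := by rw [hstep]
    have hlen1 : (pref n s (j + 1)).length = (pref n s j).length + 1 := by
      rw [pref_snoc hj0]; simp
    by_cases hlast : j + 1 < n - s
    · -- still inside segment s: the probe cell is free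
      have htri := posC_tri hs0 hsn (by omega) hlast
      have hnm : posC n s (j + 1) ∉ pref n s (j + 1) := by
        rw [mem_pref_iff hs0 (by omega)]
        rintro (⟨s', j', h1, h2, h3, h4, he⟩ | ⟨j', h1, h2, he⟩)
        · have := posC_inj h1 (by omega) hsn h3 h4 (by omega) hlast he.symm
          omega
        · have := posC_inj hs0 le_rfl hsn h1 (by omega) (by omega) hlast he.symm
          omega
      have hcond : (0 ≤ (posC n s j).1 + (dvec (s % 3)).1 ∧
          (posC n s j).1 + (dvec (s % 3)).1 < n ∧
          0 ≤ (posC n s j).2 + (dvec (s % 3)).2 ∧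
          (posC n s j).2 + (dvec (s % 3)).2 < n ∧
          pyGet2 (fillL (pref n s (j + 1)) 1 (grid0 n))
            ((posC n s j).1 + (dvec (s % 3)).1) ((posC n s j).2 + (dvec (s % 3)).2) = some 0) := by
        obtain ⟨ha, hb, hc⟩ := htri
        refine ⟨by rw [← hstep1]; omega,
          by rw [← hstep1]; omega,
          by rw [← hstep2]; omega,
          by rw [← hstep2]; omega, ?_⟩
        rw [← hstep1, ← hstep2]
        exact filled_zero hs0 (by omega) (by omega) (by omega) ⟨ha, hb, hc⟩ hnm
      rw [hdir, harr, if_pos hcond]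
      rw [← hstep1, ← hstep2]
      have := IH (m - 1) (by omega) s (j + 1) hs0 hsn (by omega) hlast (by push_cast; omega)
      rw [show ((pref n s j).length : Int) + 1 + 1 = ((pref n s (j+1)).length : Int) + 1 by
        rw [hlen1]; push_cast; ring]
      exact this
    · -- end of segment s: the probe cell is blocked (out of the square or already filled)
      have hjeq : j + 1 = n - s := by omega
      have hcond : ¬ (0 ≤ (posC n s j).1 + (dvec (s % 3)).1 ∧
          (posC n s j).1 + (dvec (s % 3)).1 < n ∧
          0 ≤ (posC n s j).2 + (dvec (s % 3)).2 ∧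
          (posC n s j).2 + (dvec (s % 3)).2 < n ∧
          pyGet2 (fillL (pref n s (j + 1)) 1 (grid0 n))
            ((posC n s j).1 + (dvec (s % 3)).1) ((posC n s j).2 + (dvec (s % 3)).2) = some 0) := by
        by_cases hs2 : 2 ≤ s
        · -- blocked by an already filled cell: the start of segment s-2
          have hwrap : posC n s (j + 1) = posC n (s - 2) 0 := by
            rw [hjeq]; exact posC_wrap hs2 hsn
          have hmem : posC n s (j + 1) ∈ pref n s (j + 1) := by
            rw [mem_pref_iff hs0 (by omega), hwrap]
            exact Or.inl ⟨s - 2, 0, by omega, by omega, le_rfl, by omega, rfl⟩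
          intro hcc
          obtain ⟨_, _, _, _, h5⟩ := hcc
          rw [← hstep1, ← hstep2] at h5
          exact filled_nonzero hs0 (by omega) (by omega) (by omega) hmem h5
        · -- s = 0 or s = 1: the probe leaves the square
          intro hcc
          obtain ⟨h1, h2, h3, h4, _⟩ := hcc
          rw [← hstep1] at h1 h2
          rw [← hstep2] at h3 h4
          have hs01 : s = 0 ∨ s = 1 := by omega
          rcases hs01 with rfl | rfl
          · -- segment 0 ends at the bottom-left corner; probing down leaves the square
            norm_num [posC] at h2
            omega
          · -- segment 1 ends at the bottom-right corner; probing right leaves the square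
            norm_num [posC] at h4
            omega
      rw [hdir, harr, if_neg hcond]
      have hmod : PySem.Int.mod (s % 3 + 1) 3 = (s + 1) % 3 := by
        rw [PySem.Int.mod_eq_emod_of_pos (by norm_num)]
        omega
      have hdir' : (PySem.List.pyGet? pyDirs ((s + 1) % 3)).getD (0, 0) = dvec ((s + 1) % 3) :=
        dirs_getD (by omega) (by omega)
      simp only [hmod, hdir']
      have hturn := posC_turn (n := n) (s := s)
      have hturn1 : (posC n (s + 1) 0).1 = (posC n s (n - s - 1)).1 + (dvec ((s + 1) % 3)).1 := by
        rw [hturn]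
      have hturn2 : (posC n (s + 1) 0).2 = (posC n s (n - s - 1)).2 + (dvec ((s + 1) % 3)).2 := by
        rw [hturn]
      have hyx : (posC n s j).1 + (dvec ((s + 1) % 3)).1 = (posC n (s + 1) 0).1 ∧
          (posC n s j).2 + (dvec ((s + 1) % 3)).2 = (posC n (s + 1) 0).2 := by
        constructor
        · rw [hturn1, show n - s - 1 = j by omega]
        · rw [hturn2, show n - s - 1 = j by omega]
      rw [hyx.1, hyx.2]
      have hprefseg : pref n s (j + 1) = pref n (s + 1) 0 := by
        rw [hjeq, ← pref_seg hs0]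
      by_cases hsn1 : s + 1 < n
      · have := IH (m - 1) (by omega) (s + 1) 0 (by omega) hsn1 le_rfl (by omega)
          (by rw [← hprefseg, hlen1]; push_cast; omega)
        rw [hprefseg]
        rw [show ((pref n s j).length : Int) + 1 + 1 = ((pref n (s+1) 0).length : Int) + 1 by
          rw [← hprefseg, hlen1]; push_cast; ring]
        exact this
      · -- that was the last number: the loop exits on the next test
        have hseq : s + 1 = n := by omega
        have hfull : pref n s (j + 1) = pref n n 0 := by rw [hprefseg, hseq]
        rw [hfull]
        rw [solutionLoop, dif_neg (by rw [← hfull, hlen1]; push_cast; omega)]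

-- ---- top-level A ----

theorem solution_grid {n : Int} (hn : 1 ≤ n) :
    solutionLoop n (PySem.Int.floordiv (n * (n + 1)) 2)
        ((PySem.List.pyRange 1 (n + 1) 1).map (fun i => List.replicate i.toNat (0 : Int)))
        0 0 0 1
      = fillL (pref n n 0) 1 (grid0 n) := by
  have hN : PySem.Int.floordiv (n * (n + 1)) 2 = ((pref n n 0).length : Int) := by
    rw [PySem.Int.floordiv_eq_ediv_of_pos (by norm_num)]
    have h2 := len_pref0 n n.toNat (by omega)
    rw [Int.toNat_of_nonneg (by omega)] at h2
    have hnn : n * (2 * n - n + 1) = n * (n + 1) := by ring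
    rw [hnn] at h2
    omega
  have harr0 : (PySem.List.pyRange 1 (n + 1) 1).map (fun i => List.replicate i.toNat (0 : Int))
      = grid0 n := by
    rw [show PySem.List.pyRange 1 (n + 1) 1 = PySem.List.pyRange 1 (n + 1) from rfl,
      PySem.List.pyRange_one]
    unfold grid0
    rw [show ((n + 1) - 1).toNat = n.toNat by omega, List.map_map]
    apply List.map_congr_left
    intro k _
    simp only [Function.comp_apply]
    congr 1
    omega
  have hpref0 : pref n 0 0 = [] := by unfold pref; simp
  have hpos0 : posC n 0 0 = (0, 0) := by unfold posC; norm_num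
  have := loopA_inv n (((pref n n 0).length : Int) - 0).toNat 0 0 le_rfl (by omega) le_rfl
    (by omega) (by rw [hpref0]; simp)
  rw [hpref0, hpos0] at this
  simp only [fillL, List.length_nil] at this
  rw [harr0, hN]
  simpa using this

-- ---- the B loops compute the same canonical fill ----

theorem innerB (n s : Int) : ∀ (l : List Int) (j : Int), 0 ≤ j →
    l.foldl
      (fun (st2 : List (List Int) × Int × Int × Int) _ =>
        (pySet2 st2.1 st2.2.1 st2.2.2.1 st2.2.2.2,
          st2.2.1 + (dvec (s % 3)).1, st2.2.2.1 + (dvec (s % 3)).2, st2.2.2.2 + 1))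
      (fillL (pref n s j) 1 (grid0 n), (posC n s j).1, (posC n s j).2,
        ((pref n s j).length : Int) + 1)
    = (fillL (pref n s (j + l.length)) 1 (grid0 n), (posC n s (j + l.length)).1,
        (posC n s (j + l.length)).2, ((pref n s (j + l.length)).length : Int) + 1) := by
  intro l
  induction l with
  | nil => intro j hj; simp
  | cons a t ih =>
    intro j hj
    rw [List.foldl_cons]
    have hstate : (pySet2 (fillL (pref n s j) 1 (grid0 n)) (posC n s j).1 (posC n s j).2
          (((pref n s j).length : Int) + 1),
        (posC n s j).1 + (dvec (s % 3)).1, (posC n s j).2 + (dvec (s % 3)).2,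
        (((pref n s j).length : Int) + 1) + 1)
        = (fillL (pref n s (j + 1)) 1 (grid0 n), (posC n s (j + 1)).1, (posC n s (j + 1)).2,
            ((pref n s (j + 1)).length : Int) + 1) := by
      have hlen1 : (pref n s (j + 1)).length = (pref n s j).length + 1 := by
        rw [pref_snoc hj]; simp
      rw [Prod.mk.injEq, Prod.mk.injEq, Prod.mk.injEq]
      refine ⟨?_, ?_, ?_, ?_⟩
      · rw [pref_snoc hj, fillL_snoc]; congr 1; omega
      · rw [congrArg Prod.fst (posC_step (n := n) (s := s) (j := j))]
      · rw [congrArg Prod.snd (posC_step (n := n) (s := s) (j := j))]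
      · rw [hlen1]; push_cast; ring
    rw [hstate]
    have hih := ih (j + 1) (by omega)
    rw [hih]
    have hj1 : j + 1 + (t.length : Int) = j + ((t.length : Int) + 1) := by ring
    rw [hj1]
    simp

theorem outerB (n : Int) : ∀ (k : Nat), (k : Int) ≤ n →
    (PySem.List.pyRange 0 (k : Int) 1).foldl (segStep n) ((grid0 n), 0, 0, 1)
      = (fillL (pref n (k : Int) 0) 1 (grid0 n), (posC n (k : Int) 0).1, (posC n (k : Int) 0).2,
          ((pref n (k : Int) 0).length : Int) + 1) := by
  intro k
  induction k with
  | zero =>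
    intro _
    rw [PySem.List.pyRange_one_eq_nil (by norm_num)]
    have hpref0 : pref n 0 0 = [] := by unfold pref; simp
    have hpos0 : posC n 0 0 = (0, 0) := by unfold posC; norm_num
    simp [hpref0, hpos0, fillL]
  | succ k ih =>
    intro hk
    have hk' : ((k : Int)) ≤ n := by push_cast at hk ⊢; omega
    push_cast
    rw [PySem.List.pyRange_one_succ_right (by positivity), List.foldl_append, ih hk']
    rw [List.foldl_cons, List.foldl_nil]
    simp only [segStep]
    have hmod : PySem.Int.mod (k : Int) 3 = (k : Int) % 3 :=
      PySem.Int.mod_eq_emod_of_pos (by norm_num)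
    have hmod' : PySem.Int.mod ((k : Int) + 1) 3 = ((k : Int) + 1) % 3 :=
      PySem.Int.mod_eq_emod_of_pos (by norm_num)
    rw [hmod, hmod', dirs_getD (by omega) (by omega), dirs_getD (by omega) (by omega)]
    rw [innerB n (k : Int) _ 0 le_rfl]
    have hlenr : ((PySem.List.pyRange 0 (n - (k : Int)) 1).length : Int) = n - (k : Int) := by
      rw [PySem.List.length_pyRange_one]
      omega
    rw [hlenr]
    simp only [zero_add]
    -- step back one cell, then turn into the start of segment k+1
    have hstepk := posC_step (n := n) (s := (k : Int)) (j := n - (k : Int) - 1)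
    rw [show n - (k : Int) - 1 + 1 = n - (k : Int) by ring] at hstepk
    have hback1 : (posC n (k : Int) (n - (k : Int))).1 - (dvec ((k : Int) % 3)).1
        = (posC n (k : Int) (n - (k : Int) - 1)).1 := by
      have h := congrArg Prod.fst hstepk
      simp only [] at h
      omega
    have hback2 : (posC n (k : Int) (n - (k : Int))).2 - (dvec ((k : Int) % 3)).2
        = (posC n (k : Int) (n - (k : Int) - 1)).2 := by
      have h := congrArg Prod.snd hstepk
      simp only [] at h
      omega
    have hseg : pref n ((k : Int) + 1) 0 = pref n (k : Int) (n - (k : Int)) :=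
      pref_seg (by positivity)
    rw [Prod.mk.injEq, Prod.mk.injEq, Prod.mk.injEq]
    have hturnk := posC_turn (n := n) (s := (k : Int))
    have hturnk1 : (posC n ((k : Int) + 1) 0).1
        = (posC n (k : Int) (n - (k : Int) - 1)).1 + (dvec (((k : Int) + 1) % 3)).1 := by
      rw [hturnk]
    have hturnk2 : (posC n ((k : Int) + 1) 0).2
        = (posC n (k : Int) (n - (k : Int) - 1)).2 + (dvec (((k : Int) + 1) % 3)).2 := by
      rw [hturnk]
    refine ⟨by rw [hseg], ?_, ?_, by rw [hseg]⟩
    · rw [hback1, hturnk1]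
    · rw [hback2, hturnk2]

theorem arr0_eq (n : Int) :
    (PySem.List.pyRange 1 (n + 1) 1).map (fun i => List.replicate i.toNat (0 : Int))
      = grid0 n := by
  rw [show PySem.List.pyRange 1 (n + 1) 1 = PySem.List.pyRange 1 (n + 1) from rfl,
    PySem.List.pyRange_one]
  unfold grid0
  rw [show ((n + 1) - 1).toNat = n.toNat by omega, List.map_map]
  apply List.map_congr_left
  intro k _
  simp only [Function.comp_apply]
  congr 1
  omega

theorem solution_alt_grid {n : Int} (hn : 0 ≤ n) :
    solution_alt n = (fillL (pref n n 0) 1 (grid0 n)).flatten := by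
  have hdef : solution_alt n = ((PySem.List.pyRange 0 n 1).foldl (segStep n)
      ((PySem.List.pyRange 1 (n + 1) 1).map (fun i => List.replicate i.toNat (0 : Int)),
        0, 0, 1)).1.flatMap (fun row => row) := rfl
  rw [hdef, arr0_eq]
  have hcast : n = ((n.toNat : Nat) : Int) := by omega
  have houter := outerB n n.toNat (by omega)
  rw [← hcast] at houter
  rw [houter]
  simp

theorem small_eq {n : Int} (h1 : -1 ≤ n) (h2 : n ≤ 0) : solution n = solution_alt n := by
  have hend : PySem.Int.floordiv (n * (n + 1)) 2 = 0 := by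
    have : n = -1 ∨ n = 0 := by omega
    rcases this with rfl | rfl <;> decide
  have harr : (PySem.List.pyRange 1 (n + 1) 1).map (fun i => List.replicate i.toNat (0 : Int))
      = ([] : List (List Int)) := by
    rw [show PySem.List.pyRange 1 (n + 1) 1 = PySem.List.pyRange 1 (n + 1) from rfl,
      PySem.List.pyRange_one_eq_nil (by omega)]
    rfl
  have hA : solution n = (solutionLoop n (PySem.Int.floordiv (n * (n + 1)) 2)
      ((PySem.List.pyRange 1 (n + 1) 1).map (fun i => List.replicate i.toNat (0 : Int)))
      0 0 0 1).foldl
      (fun answer row => row.foldl (fun answer item => answer ++ [item]) answer) [] := rfl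
  have hB : solution_alt n = ((PySem.List.pyRange 0 n 1).foldl (segStep n)
      ((PySem.List.pyRange 1 (n + 1) 1).map (fun i => List.replicate i.toNat (0 : Int)),
        0, 0, 1)).1.flatMap (fun row => row) := rfl
  rw [hA, hend, harr, solutionLoop, dif_neg (by norm_num)]
  rw [hB, harr, show PySem.List.pyRange 0 n 1 = PySem.List.pyRange 0 n from rfl,
    PySem.List.pyRange_one_eq_nil (by omega)]
  rfl

-- ===== VERDICT (by name: the statement is the Claim_ definition above) =====
theorem solution_spec : Claim_equal_solution := by
  unfold Claim_equal_solution
  intro n _ hpre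
  unfold Spec_solution Pre_solution at *
  by_cases hn : n ≤ 0
  · exact small_eq hpre hn
  · have hn1 : 1 ≤ n := by omega
    have hA : solution n = (solutionLoop n (PySem.Int.floordiv (n * (n + 1)) 2)
        ((PySem.List.pyRange 1 (n + 1) 1).map (fun i => List.replicate i.toNat (0 : Int)))
        0 0 0 1).foldl
        (fun answer row => row.foldl (fun answer item => answer ++ [item]) answer) [] := rfl
    rw [hA, solution_grid hn1]
    rw [solution_alt_grid (by omega)]
    rw [PySem.List.foldl_congr_mem _ _ (fun acc row => acc ++ row) _
      (by intro acc row _; exact PySem.List.foldl_append_singleton_eq_self row acc)]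
    rw [PySem.List.foldl_append_eq_flatten]
    simp
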